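-- pv_equiv track=rewrite | github.com/potterzot/researchTools | inst/scripts/get_paper.py | make_citation_authors
-- ===== SOURCE A (Python) =====
-- def clean_txt(txt):
--   """Takes txt and returns a sanitized utf-8 string."""
--   r = txt.encode("utf-8", errors="backslashreplace").decode('utf-8').replace("\\u0144", "")
--   return r
--
-- def make_citation_authors(res):
--   """Takes a DOI json string and returns a string of authors in Chicago style."""
--   if "author" in res.keys():
--     first_author = res['author'][0]['family'] + ", " + res['author'][0]['given']
--     last_author = res['author'][-1]['given'] + " " + res['author'][-1]['family']
--     middle_authors = ", ".join(" ".join([x['given'], x['family']]) for x in res['author'][1:-1])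
--     #assemble authors
--     author_string = first_author
--     author_string = author_string + ", " + middle_authors if middle_authors != '' else author_string
--     author_string = author_string + ", and " + last_author if len(res['author']) > 1 else author_string
--
--     author_string = author_string + "." if author_string[-1] != "." else author_string
--   else:
--     author_string = "Unknown Authors"
--
--   return clean_txt(author_string)
-- ===== SOURCE B (Python) =====
-- def _chicago(authors, first):
--   """Recursively format authors: current name + separator + rest."""
--   a = authors[0]
--   name = a['family'] + ", " + a['given'] if first else a['given'] + " " + a['family']
--   rest = authors[1:]
--   if not rest:
--     return name
--   sep = ", and " if len(rest) == 1 else ", "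
--   return name + sep + _chicago(rest, False)
--
-- def make_citation_authors(res):
--   """Takes a DOI json string and returns a string of authors in Chicago style."""
--   if "author" in res:
--     out = _chicago(res["author"], True)
--     if out[-1] != ".":
--       out = out + "."
--   else:
--     out = "Unknown Authors"
--   return out.replace("\\u0144", "")
-- ===== Notes on version B (the rewrite author's own statement) =====
-- stated objective: alternative
-- what changed: B replaces A's staged assembly (three slice-based sub-strings joined with two conditional re-assignments) by a single recursive pass over the author list that emits each name with the right separator (', and ' before the final rest element, ', ' otherwise).
import Mathlib
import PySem

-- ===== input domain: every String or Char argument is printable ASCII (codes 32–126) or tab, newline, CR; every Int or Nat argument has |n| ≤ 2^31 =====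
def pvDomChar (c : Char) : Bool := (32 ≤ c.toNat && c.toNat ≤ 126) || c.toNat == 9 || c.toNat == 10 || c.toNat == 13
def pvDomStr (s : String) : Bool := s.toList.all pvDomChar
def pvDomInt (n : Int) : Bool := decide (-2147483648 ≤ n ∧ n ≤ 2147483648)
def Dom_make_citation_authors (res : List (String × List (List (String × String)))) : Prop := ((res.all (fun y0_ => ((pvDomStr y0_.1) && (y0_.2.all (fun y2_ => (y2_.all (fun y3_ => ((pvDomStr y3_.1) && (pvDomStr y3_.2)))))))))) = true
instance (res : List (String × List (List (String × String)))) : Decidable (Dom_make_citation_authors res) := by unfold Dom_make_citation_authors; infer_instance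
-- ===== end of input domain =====

-- B formats the citation by ONE recursive pass over the author list (each step emits a name and the
-- separator for what follows), instead of A's staged assembly from three slice-based sub-strings
-- with two conditional re-assignments (objective: alternative). Both ports apply the
-- `.replace("\\u0144", "")` of A's clean_txt, which is what clean_txt computes on the ASCII domain.

-- x['family'] / x['given'] on an author dict; Pre_ excludes the KeyError, so the `getD ""` default is never taken.
def pvField (a : List (String × String)) (k : String) : String :=
  ((PySem.Dict.mk a).get? k).getD ""

-- ===== PORT A =====
def make_citation_authors (res : List (String × List (List (String × String)))) : String :=
  let d := PySem.Dict.mk res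
  let author_string :=
    if d.contains "author" then
      -- res['author'][0] / res['author'][-1]; Pre_ excludes the IndexError on an empty author list
      let authors := (d.get? "author").getD []
      let a0 := (PySem.List.pyGet? authors 0).getD []
      let an := (PySem.List.pyGet? authors (-1)).getD []
      let first_author := pvField a0 "family" ++ ", " ++ pvField a0 "given"
      let last_author := pvField an "given" ++ " " ++ pvField an "family"
      let middle_authors := PySem.Str.join ", "
        ((PySem.List.slice authors (some 1) (some (-1))).map
          (fun x => PySem.Str.join " " [pvField x "given", pvField x "family"]))
      let s1 := first_author
      let s2 := if middle_authors ≠ "" then s1 ++ ", " ++ middle_authors else s1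
      let s3 := if 1 < (authors.length : Int) then s2 ++ ", and " ++ last_author else s2
      -- author_string[-1]: s3 always contains ", ", so the index never raises; getD '.' is never taken
      if ((PySem.Str.pyGet? s3 (-1)).getD '.') ≠ '.' then s3 ++ "." else s3
    else "Unknown Authors"
  PySem.Str.replace author_string "\\u0144" ""

-- ===== PORT B =====
-- B's recursive helper _chicago(authors, first): authors[0] (Pre_ excludes the IndexError of []),
-- the name with this step's format, then recurse on authors[1:] with the separator chosen here.
def pvChicago (authors : List (List (String × String))) (first : Bool) : String :=
  let a := (PySem.List.pyGet? authors 0).getD []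
  let name := if first then pvField a "family" ++ ", " ++ pvField a "given"
              else pvField a "given" ++ " " ++ pvField a "family"
  let rest := PySem.List.slice authors (some 1) none
  if h : rest.isEmpty then name
  else
    let sep := if rest.length == 1 then ", and " else ", "
    name ++ sep ++ pvChicago rest false
termination_by authors.length
decreasing_by
  simp only [rest, PySem.List.slice_from_one] at h ⊢
  cases authors with
  | nil => simp at h
  | cons x xs => simp

def make_citation_authors_alt (res : List (String × List (List (String × String)))) : String :=
  let out :=
    if (PySem.Dict.mk res).contains "author" then
      let s := pvChicago (((PySem.Dict.mk res).get? "author").getD []) true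
      if ((PySem.Str.pyGet? s (-1)).getD '.') ≠ '.' then s ++ "." else s
    else "Unknown Authors"
  PySem.Str.replace out "\\u0144" ""

-- ===== PRECONDITION & SPEC =====
-- Pre_ excludes exactly the inputs where the Python A raises: an 'author' entry that is the empty list
-- (IndexError on res['author'][0]) or an author dict missing the 'given' or 'family' key (KeyError).
def Pre_make_citation_authors (res : List (String × List (List (String × String)))) : Prop :=
  (((PySem.Dict.mk res).get? "author").all (fun authors =>
      !authors.isEmpty &&
      authors.all (fun a =>
        ((PySem.Dict.mk a).get? "given").isSome && ((PySem.Dict.mk a).get? "family").isSome))) = true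
instance (res : List (String × List (List (String × String)))) : Decidable (Pre_make_citation_authors res) := by unfold Pre_make_citation_authors; infer_instance

def pvWitness_make_citation_authors : (List (String × List (List (String × String)))) :=
  [("author", [[("family", "Doe"), ("given", "Jane")], [("given", "John"), ("family", "Smith")]])]

def Spec_make_citation_authors (res : List (String × List (List (String × String)))) (out : String) : Prop := out = make_citation_authors_alt res
instance (res : List (String × List (List (String × String)))) (out : String) : Decidable (Spec_make_citation_authors res out) := by unfold Spec_make_citation_authors; infer_instance

-- ===== CLAIM (what is proved, stated in full; the proofs are below) =====
def Claim_equal_make_citation_authors : Prop := ∀ (res : List (String × List (List (String × String)))), Dom_make_citation_authors res → Pre_make_citation_authors res → Spec_make_citation_authors res (make_citation_authors res)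

-- ===== LEMMAS AND PROOFS =====
-- (the verdict theorem make_citation_authors_spec is at the very bottom)

-- "given family" formatting, a proof-side abbreviation
def pvFmt (a : List (String × String)) : String :=
  pvField a "given" ++ " " ++ pvField a "family"

theorem pv_str_ne_empty (s : String) (h : s.toList ≠ []) : s ≠ "" := by
  intro he; apply h; rw [he]; rfl

theorem pv_cat_toList_ne (p m q : String) (hm : m ≠ "") : (p ++ m ++ q).toList ≠ [] := by
  rw [String.toList_append, String.toList_append]
  intro h
  rcases List.append_eq_nil_iff.mp h with ⟨h1, _⟩
  rcases List.append_eq_nil_iff.mp h1 with ⟨_, hm2⟩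
  exact hm (String.toList_injective (by rw [hm2]; rfl))

theorem pv_join_nil (sep : String) : PySem.Str.join sep [] = "" := by
  apply String.toList_injective
  simp [PySem.Str.join, PySem.Chars.join_nil]

theorem pv_join_single (sep p : String) : PySem.Str.join sep [p] = p := by
  apply String.toList_injective
  simp [PySem.Str.join, PySem.Chars.join_singleton]

theorem pv_join_cons (sep p q : String) (r : List String) :
    PySem.Str.join sep (p :: q :: r) = p ++ sep ++ PySem.Str.join sep (q :: r) := by
  apply String.toList_injective
  simp [PySem.Str.join, PySem.Chars.join_cons_cons, String.toList_append]

theorem pv_join_pair (p q : String) : PySem.Str.join " " [p, q] = p ++ " " ++ q := by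
  rw [pv_join_cons, pv_join_single]

theorem pv_join_ne_empty (sep x : String) (l : List String) (hx : x.toList ≠ []) :
    PySem.Str.join sep (x :: l) ≠ "" := by
  cases l with
  | nil => rw [pv_join_single]; exact pv_str_ne_empty x hx
  | cons y t =>
      rw [pv_join_cons]
      apply pv_str_ne_empty
      rw [String.toList_append, String.toList_append]
      intro h
      rcases List.append_eq_nil_iff.mp h with ⟨h1, _⟩
      rcases List.append_eq_nil_iff.mp h1 with ⟨hx2, _⟩
      exact hx hx2

theorem pv_slice_mid {α : Type} (xs : List α) :
    PySem.List.slice xs (some 1) (some (-1)) = xs.tail.dropLast := by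
  cases xs with
  | nil => rfl
  | cons a t =>
      simp [PySem.List.slice]
      rw [List.dropLast_eq_take]

-- characterisation of B's recursive helper on a tail of length ≥ 2
theorem pv_chic_char (rs : List (List (String × String))) (hne : rs ≠ [])
    (r : List (String × String)) :
    pvChicago (r :: rs) false =
      PySem.Str.join ", " (pvFmt r :: List.map pvFmt rs.dropLast)
        ++ ", and " ++ pvFmt (rs.getLast?.getD []) := by
  induction rs generalizing r with
  | nil => exact absurd rfl hne
  | cons r2 rs2 ih =>
      rw [pvChicago]
      simp only [PySem.List.pyGet?_zero_cons, Option.getD_some, PySem.List.slice_from_one,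
        List.tail_cons, List.isEmpty_cons, Bool.false_eq_true, dite_false, if_false]
      cases rs2 with
      | nil =>
          rw [pvChicago]
          simp [PySem.List.slice_from_one, pv_join_single, pvFmt]
      | cons r3 rs3 =>
          rw [ih (by simp)]
          have hlen : ((r2 :: r3 :: rs3).length == 1) = false := by simp
          rw [hlen]
          simp only [List.map_cons, pv_join_cons,
            List.dropLast_cons_of_ne_nil (by simp : r3 :: rs3 ≠ []),
            List.getLast?_cons_cons]
          simp [pvFmt, String.append_assoc]

theorem pv_map_fmt (l : List (List (String × String))) :
    List.map pvFmt l = List.map (fun x => pvField x "given" ++ (" " ++ pvField x "family")) l := by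
  apply List.map_congr_left; intro x _; simp only [pvFmt, String.append_assoc]

-- ===== VERDICT =====
theorem make_citation_authors_spec : Claim_equal_make_citation_authors := by
  intro res _ hpre
  unfold Spec_make_citation_authors
  simp only [make_citation_authors, make_citation_authors_alt,
    PySem.Dict.contains_eq_isSome_get?]
  unfold Pre_make_citation_authors at hpre
  cases h : (PySem.Dict.mk res).get? "author" with
  | none =>
      simp only [Option.isSome_none, Bool.false_eq_true, if_false]
  | some authors =>
      rw [h] at hpre
      simp only [Option.all_some, Bool.and_eq_true] at hpre
      obtain ⟨hne, _⟩ := hpre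
      cases authors with
      | nil => simp at hne
      | cons a0 rest =>
          simp only [Option.isSome_some, if_true, Option.getD_some,
            PySem.List.pyGet?_zero_cons, PySem.List.pyGet?_neg_one, pv_slice_mid,
            List.tail_cons, List.length_cons]
          congr 1
          cases rest with
          | nil =>
              rw [pvChicago]
              simp [PySem.List.slice_from_one, pv_join_nil]
          | cons r rs =>
              rw [pvChicago]
              simp only [PySem.List.pyGet?_zero_cons, Option.getD_some,
                PySem.List.slice_from_one, List.tail_cons, List.isEmpty_cons,
                Bool.false_eq_true, dite_false, if_true]
              cases rs with
              | nil =>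
                  rw [pvChicago]
                  simp [PySem.List.slice_from_one, pv_join_nil]
              | cons r2 rs2 =>
                  rw [pv_chic_char (r2 :: rs2) (by simp) r]
                  cases hL : (r2 :: rs2).getLast? with
                  | none => simp at hL
                  | some L =>
                      have hmid : (pvField r "given" ++ " " ++ pvField r "family").toList ≠ [] :=
                        pv_cat_toList_ne _ " " _ (by decide)
                      have hlen2 : ((r :: r2 :: rs2).length == 1) = false := by simp
                      rw [hlen2]
                      simp only [List.dropLast_cons_of_ne_nil (by simp : r2 :: rs2 ≠ []),
                        List.getLast?_cons_cons, hL, Option.getD_some, List.map_cons]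
                      have hjoin : PySem.Str.join ", "
                          (PySem.Str.join " " [pvField r "given", pvField r "family"] ::
                            List.map (fun x => PySem.Str.join " " [pvField x "given", pvField x "family"])
                              ((r2 :: rs2).dropLast)) ≠ "" := by
                        apply pv_join_ne_empty
                        rw [pv_join_pair]; exact hmid
                      rw [if_pos hjoin]
                      rw [if_pos (show (1 : Int) < (((r :: r2 :: rs2).length + 1 : Nat) : Int) by simp; positivity)]
                      simp only [pvFmt, pv_join_pair, String.append_assoc, pv_map_fmt,
                        Bool.false_eq_true, if_false]
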